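-- pv_equiv track=rewrite | github.com/Unknownflow/CS1010X | PracticalExam/2024/template.py | ACB
-- ===== SOURCE A (Python) =====
-- def ACB(lst):
--     less_than_count = 0
--     more_than_count = 0
--     less_than_idx = []
--     more_than_idx = []
--     for i in range(len(lst)-1):
--         if lst[i] < lst[i+1]:
--             less_than_count += 1
--             less_than_idx.append(i)
--         elif lst[i] > lst[i+1]:
--             more_than_count += 1
--             more_than_idx.append(i)
--
--     if less_than_count == 0 or more_than_count == 0:
--         return False
--     else:
--         if less_than_idx[0] < more_than_idx[-1]:
--             return True
--         return False
-- ===== SOURCE B (Python) =====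
-- def ACB(lst):
--     n = len(lst)
--     first_asc = None
--     for i in range(n - 1):
--         if lst[i] < lst[i + 1]:
--             first_asc = i
--             break
--     last_desc = None
--     for i in range(n - 2, -1, -1):
--         if lst[i] > lst[i + 1]:
--             last_desc = i
--             break
--     if first_asc is None or last_desc is None:
--         return False
--     return first_asc < last_desc
-- ===== Notes on version B (the rewrite author's own statement) =====
-- stated objective: faster
-- what changed: Instead of accumulating counts and full index lists of all ascending/descending adjacent pairs, B finds the first ascending index by a forward scan with early break and the last descending index by a backward scan with early break, then compares the two.
import Mathlib
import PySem

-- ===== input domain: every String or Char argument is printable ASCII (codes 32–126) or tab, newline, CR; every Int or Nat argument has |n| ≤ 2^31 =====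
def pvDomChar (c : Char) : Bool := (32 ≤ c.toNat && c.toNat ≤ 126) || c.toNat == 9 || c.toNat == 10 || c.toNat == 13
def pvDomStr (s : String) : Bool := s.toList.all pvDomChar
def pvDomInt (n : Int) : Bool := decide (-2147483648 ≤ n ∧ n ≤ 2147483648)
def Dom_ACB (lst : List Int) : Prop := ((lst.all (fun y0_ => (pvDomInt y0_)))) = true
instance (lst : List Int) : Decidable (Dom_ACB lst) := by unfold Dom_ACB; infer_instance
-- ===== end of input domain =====

-- B replaces A's count/index-list accumulation by two early-exit scans (forward for the
-- first ascending index, backward for the last descending index); return values agree everywhere.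

-- ===== PORT A =====
def ACB (lst : List Int) : Bool :=
  let st := (PySem.List.pyRange 0 (PySem.List.len lst - 1) 1).foldl
    (fun (st : Int × Int × List Int × List Int) i =>
      let (lc, mc, li, mi) := st
      if PySem.List.pyGetD lst i 0 < PySem.List.pyGetD lst (i+1) 0 then
        (lc + 1, mc, li ++ [i], mi)
      else if PySem.List.pyGetD lst i 0 > PySem.List.pyGetD lst (i+1) 0 then
        (lc, mc + 1, li, mi ++ [i])
      else (lc, mc, li, mi)) (0, 0, [], [])
  if st.1 == 0 || st.2.1 == 0 then false
  else
    -- less_than_idx[0] / more_than_idx[-1]: nonempty here, so pyGet? is some; none branch unreachable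
    match PySem.List.pyGet? st.2.2.1 0, PySem.List.pyGet? st.2.2.2 (-1) with
    | some a, some b => if a < b then true else false
    | _, _ => false

-- ===== PORT B =====
def ACB_alt (lst : List Int) : Bool :=
  let n := PySem.List.len lst
  -- forward scan, 'break' modeled by a set Option that later steps leave unchanged
  let fa := (PySem.List.pyRange 0 (n - 1) 1).foldl
    (fun (acc : Option Int) i =>
      match acc with
      | some _ => acc
      | none => if PySem.List.pyGetD lst i 0 < PySem.List.pyGetD lst (i+1) 0 then some i else none) none
  -- backward scan over range(n-2, -1, -1)
  let ld := (PySem.List.pyRange (n - 2) (-1) (-1)).foldl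
    (fun (acc : Option Int) i =>
      match acc with
      | some _ => acc
      | none => if PySem.List.pyGetD lst i 0 > PySem.List.pyGetD lst (i+1) 0 then some i else none) none
  -- 'if first_asc is None or last_desc is None: return False; return first_asc < last_desc'
  match fa with
  | none => false
  | some a =>
    match ld with
    | none => false
    | some d => decide (a < d)

-- ===== PRECONDITION & SPEC =====
def Spec_ACB (lst : List Int) (out : Bool) : Prop := out = ACB_alt lst
instance (lst : List Int) (out : Bool) : Decidable (Spec_ACB lst out) := by unfold Spec_ACB; infer_instance

-- ===== CLAIM (what is proved, stated in full; the proofs are below) =====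
def Claim_equal_ACB : Prop := ∀ (lst : List Int), Dom_ACB lst → Spec_ACB lst (ACB lst)

-- ===== LEMMAS AND PROOFS =====

-- A's fold accumulates the filters of the range by the two (mutually exclusive) tests.
theorem foldA_eq (lst : List Int) (l : List Int) (lc mc : Int) (li mi : List Int) :
    l.foldl
      (fun (st : Int × Int × List Int × List Int) i =>
        let (lc, mc, li, mi) := st
        if PySem.List.pyGetD lst i 0 < PySem.List.pyGetD lst (i+1) 0 then
          (lc + 1, mc, li ++ [i], mi)
        else if PySem.List.pyGetD lst i 0 > PySem.List.pyGetD lst (i+1) 0 then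
          (lc, mc + 1, li, mi ++ [i])
        else (lc, mc, li, mi)) (lc, mc, li, mi)
    = (lc + (l.countP (fun i => PySem.List.pyGetD lst i 0 < PySem.List.pyGetD lst (i+1) 0) : Int),
       mc + (l.countP (fun i => PySem.List.pyGetD lst i 0 > PySem.List.pyGetD lst (i+1) 0) : Int),
       li ++ l.filter (fun i => PySem.List.pyGetD lst i 0 < PySem.List.pyGetD lst (i+1) 0),
       mi ++ l.filter (fun i => PySem.List.pyGetD lst i 0 > PySem.List.pyGetD lst (i+1) 0)) := by
  induction l generalizing lc mc li mi with
  | nil => simp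
  | cons x xs ih =>
    by_cases h1 : PySem.List.pyGetD lst x 0 < PySem.List.pyGetD lst (x+1) 0
    · have h2 : ¬ PySem.List.pyGetD lst x 0 > PySem.List.pyGetD lst (x+1) 0 := by omega
      simp [List.foldl_cons, h1, h2, ih]
      all_goals omega
    · by_cases h2 : PySem.List.pyGetD lst x 0 > PySem.List.pyGetD lst (x+1) 0
      · simp [List.foldl_cons, h1, h2, ih]
        all_goals omega
      · simp [List.foldl_cons, h1, h2, ih]

-- B's break-fold is find? of the traversal order.
theorem foldB_eq (p : Int → Prop) [DecidablePred p] (l : List Int) (acc : Option Int) :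
    l.foldl (fun (acc : Option Int) i =>
      match acc with
      | some _ => acc
      | none => if p i then some i else none) acc
    = (match acc with | some a => some a | none => l.find? (fun i => decide (p i))) := by
  induction l generalizing acc with
  | nil => cases acc <;> simp
  | cons x xs ih =>
    cases acc with
    | some a => simp [List.foldl_cons, ih]
    | none =>
      by_cases h : p x
      · rw [List.foldl_cons, if_pos h, ih]
        simp [h]
      · rw [List.foldl_cons, if_neg h, ih]
        simp [h]

theorem find?_eq_head?_filter' (p : Int → Bool) (l : List Int) :
    l.find? p = (l.filter p).head? := by
  induction l with
  | nil => rfl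
  | cons x xs ih =>
    by_cases h : p x
    · rw [List.find?_cons_of_pos h, List.filter_cons_of_pos h]; rfl
    · rw [List.find?_cons_of_neg h, List.filter_cons_of_neg h]; exact ih

theorem find?_reverse_eq_getLast?_filter (p : Int → Bool) (l : List Int) :
    l.reverse.find? p = (l.filter p).getLast? := by
  rw [find?_eq_head?_filter', List.filter_reverse, List.head?_reverse]

-- ===== VERDICT (by name: the statement is the Claim_ definition above) =====
theorem ACB_spec : Claim_equal_ACB := by
  intro lst _
  unfold Spec_ACB
  simp only [ACB, ACB_alt, PySem.List.len_eq]
  rw [foldA_eq,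
    foldB_eq (p := fun i => PySem.List.pyGetD lst i 0 < PySem.List.pyGetD lst (i+1) 0),
    foldB_eq (p := fun i => PySem.List.pyGetD lst i 0 > PySem.List.pyGetD lst (i+1) 0),
    PySem.List.pyRange_neg_one_eq_reverse]
  have hrw : (((lst.length : Int) - 2) + 1) = (lst.length : Int) - 1 := by ring
  rw [hrw, find?_eq_head?_filter', find?_reverse_eq_getLast?_filter,
    show ((-1 : Int) + 1) = 0 from by ring]
  set r := PySem.List.pyRange 0 ((lst.length : Int) - 1) with hr
  set pA := fun i => decide (PySem.List.pyGetD lst i 0 < PySem.List.pyGetD lst (i+1) 0) with hpA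
  set pD := fun i => decide (PySem.List.pyGetD lst i 0 > PySem.List.pyGetD lst (i+1) 0) with hpD
  simp only [List.countP_eq_length_filter, List.nil_append]
  rcases hA : r.filter pA with _ | ⟨a, ta⟩
  · simp
  · rcases hD : r.filter pD with _ | ⟨b, tb⟩
    · simp
    · have t1 : ((ta.length : Int) + 1) ≠ 0 := by omega
      have t2 : ((tb.length : Int) + 1) ≠ 0 := by omega
      simp [t1, t2, PySem.List.pyGet?, PySem.List.pyIdx?, List.getLast?_eq_some_getLast, List.getLast_eq_getElem]
      exact Iff.rfl
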